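-- pv_equiv track=rewrite | github.com/namjaejeon/ntfsprogs-plus | tests/time_result_make_graph.py | parse_time_v_output
-- ===== SOURCE A (Python) =====
-- def parse_time_v_output(output):
--     results = []
--     current_result = {}
--
--     for line in output:
--         line = line.strip()
--         if line.startswith("Running"):
--             if current_result:
--                 results.append(current_result)
--             current_result = {'image': line.split("Running ")[1]}
--         elif ':' in line:
--             r = line.rsplit(":", 1)
--             key = r[0].strip()
--             value = r[1].strip()
--             if key.strip() not in current_result:
--                 current_result[key.strip()] = value.strip()
--
--     if current_result:
--         results.append(current_result)
--
--     return results
-- ===== SOURCE B (Python) =====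
-- def parse_time_v_output(output):
--     # Pass 1: strip lines and cut them into blocks at each "Running" header.
--     blocks = []
--     cur = []
--     for line in output:
--         line = line.strip()
--         if line.startswith("Running"):
--             blocks.append(cur)
--             cur = [line]
--         else:
--             cur.append(line)
--     blocks.append(cur)
--
--     # Pass 2: turn each block into a dict (first value wins), keep non-empty ones.
--     results = []
--     for block in blocks:
--         d = {}
--         for line in block:
--             if line.startswith("Running"):
--                 d['image'] = line.split("Running ")[1]
--             elif ':' in line:
--                 key, value = line.rsplit(":", 1)
--                 key = key.strip()
--                 if key not in d:
--                     d[key] = value.strip()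
--         if d:
--             results.append(d)
--     return results
-- ===== Notes on version B (the rewrite author's own statement) =====
-- stated objective: alternative
-- what changed: B replaces A's single loop with a mutable current-dict by two passes: first cut the stripped lines into blocks at each 'Running' header, then turn each block into a dict (first value wins) and keep the non-empty ones.
import Mathlib
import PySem

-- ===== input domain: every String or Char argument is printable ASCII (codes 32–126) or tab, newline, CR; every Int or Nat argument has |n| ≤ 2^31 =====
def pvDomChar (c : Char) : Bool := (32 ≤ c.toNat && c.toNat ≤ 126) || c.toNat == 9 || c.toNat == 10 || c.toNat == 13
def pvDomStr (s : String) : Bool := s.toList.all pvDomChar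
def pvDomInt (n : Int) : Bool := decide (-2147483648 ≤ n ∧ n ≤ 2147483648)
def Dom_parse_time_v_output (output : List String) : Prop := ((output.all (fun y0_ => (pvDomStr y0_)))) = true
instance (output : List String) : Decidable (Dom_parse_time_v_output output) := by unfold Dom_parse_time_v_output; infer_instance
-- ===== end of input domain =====

-- B parses in two passes — cut the stripped lines into blocks at each "Running" header, then build
-- one dict per block — instead of A's single loop with a mutable current dict (objective: alternative).

-- ===== PORT A =====
-- shared helper: line.rsplit(":", 1) — hand port, exact whenever ':' occurs in line
-- (both Pythons only call it under the guard `':' in line`)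
def rsplitColon (line : String) : String × String :=
  let rev := line.toList.reverse
  (String.ofList (((rev.dropWhile (fun c => c ≠ ':')).drop 1).reverse),
   String.ofList ((rev.takeWhile (fun c => c ≠ ':')).reverse))

-- shared helper: line.split("Running ")[1]; the `getD`s never fire inside Pre_ (Python raises
-- IndexError exactly where pyGet? is none, and Pre_ excludes those inputs)
def imageOf (line : String) : String :=
  (PySem.List.pyGet? ((PySem.Str.split? line "Running ").getD []) 1).getD ""

def parse_time_v_output (output : List String) : List (List (String × String)) :=
  let st := output.foldl (fun (st : List (List (String × String)) × PySem.Dict String String) line =>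
    let line := PySem.Str.strip line
    if PySem.Str.startswith line "Running" then
      let results := if st.2.items = [] then st.1 else st.1 ++ [st.2.items]
      (results, PySem.Dict.ofList [("image", imageOf line)])
    else if PySem.Str.isIn ":" line then
      let r := rsplitColon line
      let key := PySem.Str.strip r.1
      let value := PySem.Str.strip r.2
      if st.2.contains (PySem.Str.strip key) then st
      else (st.1, st.2.insert (PySem.Str.strip key) (PySem.Str.strip value))
    else st) ([], PySem.Dict.empty)
  if st.2.items = [] then st.1 else st.1 ++ [st.2.items]

-- ===== PORT B =====
def parse_time_v_output_alt (output : List String) : List (List (String × String)) :=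
  -- pass 1: strip each line and cut into blocks at "Running" headers
  let p := output.foldl (fun (st : List (List String) × List String) line =>
    let line := PySem.Str.strip line
    if PySem.Str.startswith line "Running" then (st.1 ++ [st.2], [line])
    else (st.1, st.2 ++ [line])) ([], [])
  let blocks := p.1 ++ [p.2]
  -- pass 2: one dict per block, first value wins; keep non-empty dicts
  blocks.foldl (fun results block =>
    let d := block.foldl (fun (d : PySem.Dict String String) line =>
      if PySem.Str.startswith line "Running" then d.insert "image" (imageOf line)
      else if PySem.Str.isIn ":" line then
        let r := rsplitColon line
        let key := PySem.Str.strip r.1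
        if d.contains key then d else d.insert key (PySem.Str.strip r.2)
      else d) PySem.Dict.empty
    if d.items = [] then results else results ++ [d.items]) []

-- ===== PRECONDITION & SPEC =====
-- Pre_ excludes exactly the inputs on which Python A raises IndexError: a stripped line that
-- starts with "Running" but does not contain "Running ", so line.split("Running ")[1] is out of range.
def Pre_parse_time_v_output (output : List String) : Prop :=
  ∀ line ∈ output, PySem.Str.startswith (PySem.Str.strip line) "Running" = true →
    PySem.Str.isIn "Running " (PySem.Str.strip line) = true

instance (output : List String) : Decidable (Pre_parse_time_v_output output) := by
  unfold Pre_parse_time_v_output; infer_instance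

def pvWitness_parse_time_v_output : List String := ["Running img", " wall clock : 1:02 ", "x"]

def Spec_parse_time_v_output (output : List String) (out : List (List (String × String))) : Prop :=
  out = parse_time_v_output_alt output
instance (output : List String) (out : List (List (String × String))) : Decidable (Spec_parse_time_v_output output out) := by
  unfold Spec_parse_time_v_output; infer_instance

-- ===== CLAIM (what is proved, stated in full; the proofs are below) =====
def Claim_equal_parse_time_v_output : Prop := ∀ (output : List String), Dom_parse_time_v_output output → Pre_parse_time_v_output output → Spec_parse_time_v_output output (parse_time_v_output output)

-- ===== LEMMAS AND PROOFS =====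

-- strip is idempotent (A strips keys/values twice, B once)
theorem pv_dropWhile_idem (p : Char → Bool) (l : List Char) :
    (l.dropWhile p).dropWhile p = l.dropWhile p := by
  induction l with
  | nil => simp
  | cons a l ih =>
    by_cases h : p a <;> simp [h, ih]

theorem pv_dropWhile_head {α : Type} (p : α → Bool) (l : List α) (a : α) (t : List α)
    (h : l.dropWhile p = a :: t) : p a = false := by
  induction l with
  | nil => simp at h
  | cons b l ih =>
    rw [List.dropWhile_cons] at h
    by_cases hb : p b
    · rw [if_pos hb] at h; exact ih h
    · rw [if_neg hb] at h
      injection h with h1 _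
      subst h1
      simpa using hb

theorem pv_rstrip_idem (l : List Char) :
    PySem.Chars.rstrip (PySem.Chars.rstrip l) = PySem.Chars.rstrip l := by
  simp [PySem.Chars.rstrip, pv_dropWhile_idem]

theorem pv_lstrip_rstrip (l : List Char) :
    PySem.Chars.lstrip (PySem.Chars.rstrip (PySem.Chars.lstrip l)) =
      PySem.Chars.rstrip (PySem.Chars.lstrip l) := by
  rcases hL : PySem.Chars.lstrip l with _ | ⟨a, t⟩
  · simp [PySem.Chars.rstrip, PySem.Chars.lstrip]
  · have ha : PySem.Chars.isspace a = false :=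
      pv_dropWhile_head PySem.Chars.isspace l a t (by simpa [PySem.Chars.lstrip] using hL)
    have hpre : PySem.Chars.rstrip (a :: t) <+: (a :: t) := by
      have hsuf : (a :: t).reverse.dropWhile PySem.Chars.isspace <:+ (a :: t).reverse :=
        List.dropWhile_suffix _
      exact List.reverse_suffix.mp (by simpa [PySem.Chars.rstrip] using hsuf)
    rcases hr : PySem.Chars.rstrip (a :: t) with _ | ⟨b, u⟩
    · simp [PySem.Chars.lstrip]
    · rw [hr] at hpre
      obtain ⟨k, hk⟩ := hpre
      have hb : b = a := (List.cons_eq_cons.mp (by simpa using hk)).1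
      subst hb
      simp [PySem.Chars.lstrip, ha]

theorem pv_strip_idem (s : String) :
    PySem.Str.strip (PySem.Str.strip s) = PySem.Str.strip s := by
  simp only [PySem.Str.strip, PySem.Chars.strip, String.toList_ofList]
  rw [pv_lstrip_rstrip, pv_rstrip_idem]

-- named versions of the loop bodies (definitionally the ports' lambdas)
def stepA (st : List (List (String × String)) × PySem.Dict String String) (line : String) :
    List (List (String × String)) × PySem.Dict String String :=
  let line := PySem.Str.strip line
  if PySem.Str.startswith line "Running" then
    let results := if st.2.items = [] then st.1 else st.1 ++ [st.2.items]
    (results, PySem.Dict.ofList [("image", imageOf line)])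
  else if PySem.Str.isIn ":" line then
    let r := rsplitColon line
    let key := PySem.Str.strip r.1
    let value := PySem.Str.strip r.2
    if st.2.contains (PySem.Str.strip key) then st
    else (st.1, st.2.insert (PySem.Str.strip key) (PySem.Str.strip value))
  else st

def finA (st : List (List (String × String)) × PySem.Dict String String) :
    List (List (String × String)) :=
  if st.2.items = [] then st.1 else st.1 ++ [st.2.items]

def stepBlk (st : List (List String) × List String) (line : String) :
    List (List String) × List String :=
  let line := PySem.Str.strip line
  if PySem.Str.startswith line "Running" then (st.1 ++ [st.2], [line])
  else (st.1, st.2 ++ [line])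

def stepDict (d : PySem.Dict String String) (line : String) : PySem.Dict String String :=
  if PySem.Str.startswith line "Running" then d.insert "image" (imageOf line)
  else if PySem.Str.isIn ":" line then
    let r := rsplitColon line
    let key := PySem.Str.strip r.1
    if d.contains key then d else d.insert key (PySem.Str.strip r.2)
  else d

def buildB (b : List String) : PySem.Dict String String :=
  b.foldl stepDict PySem.Dict.empty

theorem portA_eq (output : List String) :
    parse_time_v_output output = finA (output.foldl stepA ([], PySem.Dict.empty)) := rfl

theorem portB_eq (output : List String) :
    parse_time_v_output_alt output =
      (let p := output.foldl stepBlk ([], [])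
       (p.1 ++ [p.2]).foldl (fun results block =>
         if (buildB block).items = [] then results else results ++ [(buildB block).items]) []) := rfl

-- A's result as a plain recursion over the lines
def emitD (d : PySem.Dict String String) : List (List (String × String)) :=
  if d.items = [] then [] else [d.items]

def colonStep (d : PySem.Dict String String) (s : String) : PySem.Dict String String :=
  if PySem.Str.isIn ":" s then
    let r := rsplitColon s
    if d.contains (PySem.Str.strip r.1) then d
    else d.insert (PySem.Str.strip r.1) (PySem.Str.strip r.2)
  else d

def fRec (d : PySem.Dict String String) : List String → List (List (String × String))
  | [] => emitD d
  | l :: ls =>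
    let s := PySem.Str.strip l
    if PySem.Str.startswith s "Running" then
      emitD d ++ fRec (PySem.Dict.ofList [("image", imageOf s)]) ls
    else fRec (colonStep d s) ls

theorem fold_A (ls : List String) :
    ∀ (res : List (List (String × String))) (d : PySem.Dict String String),
    finA (ls.foldl stepA (res, d)) = res ++ fRec d ls := by
  induction ls with
  | nil => intro res d; simp [finA, fRec, emitD]; split <;> simp
  | cons l ls ih =>
    intro res d
    simp only [List.foldl_cons]
    by_cases hR : PySem.Str.startswith (PySem.Str.strip l) "Running" = true
    · have hstep : stepA (res, d) l =
        ((if d.items = [] then res else res ++ [d.items]),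
          PySem.Dict.ofList [("image", imageOf (PySem.Str.strip l))]) := by
        simp only [stepA, hR, if_true]
      rw [hstep, ih]
      simp only [fRec, hR, if_true]
      by_cases hd : d.items = [] <;> simp [hd, emitD]
    · by_cases hc : PySem.Str.isIn ":" (PySem.Str.strip l) = true
      · have hstep : stepA (res, d) l = (res, colonStep d (PySem.Str.strip l)) := by
          simp only [stepA, colonStep, hR, hc, if_true, Bool.false_eq_true, if_false,
            pv_strip_idem]
          split <;> rfl
        rw [hstep, ih]
        simp only [fRec]
        rw [if_neg hR]
      · have hstep : stepA (res, d) l = (res, d) := by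
          simp only [stepA, hR, hc, Bool.false_eq_true, if_false]
        rw [hstep, ih]
        simp only [fRec]
        rw [if_neg hR, colonStep, if_neg hc]

-- B pass 1 as a plain recursion (blocks carry stripped lines)
def blocksR (c : List String) : List String → List (List String)
  | [] => [c]
  | l :: ls =>
    let s := PySem.Str.strip l
    if PySem.Str.startswith s "Running" then c :: blocksR [s] ls
    else blocksR (c ++ [s]) ls

theorem fold_blocks (ls : List String) :
    ∀ (bs : List (List String)) (c : List String),
    (ls.foldl stepBlk (bs, c)).1 ++ [(ls.foldl stepBlk (bs, c)).2] = bs ++ blocksR c ls := by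
  induction ls with
  | nil => intro bs c; simp [blocksR]
  | cons l ls ih =>
    intro bs c
    simp only [List.foldl_cons]
    by_cases hR : PySem.Str.startswith (PySem.Str.strip l) "Running" = true
    · have hstep : stepBlk (bs, c) l = (bs ++ [c], [PySem.Str.strip l]) := by
        simp only [stepBlk, hR, if_true]
      rw [hstep, ih]
      simp only [blocksR]
      rw [if_pos hR]
      simp
    · have hstep : stepBlk (bs, c) l = (bs, c ++ [PySem.Str.strip l]) := by
        simp only [stepBlk, hR, Bool.false_eq_true, if_false]
      rw [hstep, ih]
      simp only [blocksR]
      rw [if_neg hR]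

-- B pass 2 as a flatMap
theorem fold_emit (bs : List (List String)) :
    ∀ (res : List (List (String × String))),
    bs.foldl (fun results block =>
        if (buildB block).items = [] then results else results ++ [(buildB block).items]) res
      = res ++ bs.flatMap (fun b => emitD (buildB b)) := by
  induction bs with
  | nil => intro res; simp
  | cons b bs ih =>
    intro res
    simp only [List.foldl_cons, List.flatMap_cons]
    by_cases hd : (buildB b).items = [] <;> simp [hd, ih, emitD]

-- a stripped line needs no re-strip inside stepDict vs colonStep
theorem stepDict_eq_colonStep (d : PySem.Dict String String) (s : String)
    (hR : ¬ PySem.Str.startswith s "Running" = true) :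
    stepDict d s = colonStep d s := by
  simp only [stepDict, colonStep, hR, Bool.false_eq_true, if_false]

-- main bridge: B's blocks produce exactly A's recursion
set_option maxHeartbeats 1000000 in
theorem main_bridge (ls : List String) :
    ∀ (c : List String),
    (blocksR c ls).flatMap (fun b => emitD (buildB b)) = fRec (buildB c) ls := by
  induction ls with
  | nil => intro c; simp [blocksR, fRec]
  | cons l ls ih =>
    intro c
    simp only [blocksR, fRec]
    by_cases hR : PySem.Str.startswith (PySem.Str.strip l) "Running" = true
    · rw [if_pos hR, if_pos hR, List.flatMap_cons, ih]
      have h1 : buildB [PySem.Str.strip l] =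
          PySem.Dict.ofList [("image", imageOf (PySem.Str.strip l))] := by
        simp only [buildB, List.foldl_cons, List.foldl_nil, stepDict]
        rw [if_pos hR]
        rfl
      rw [h1]
    · rw [if_neg hR, if_neg hR, ih]
      have h2 : buildB (c ++ [PySem.Str.strip l]) =
          colonStep (buildB c) (PySem.Str.strip l) := by
        simp only [buildB, List.foldl_append, List.foldl_cons, List.foldl_nil]
        exact stepDict_eq_colonStep _ _ hR
      rw [h2]

-- ===== VERDICT (by name: the statement is the Claim_ definition above) =====
theorem parse_time_v_output_spec : Claim_equal_parse_time_v_output := by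
  intro output _ _
  unfold Spec_parse_time_v_output
  rw [portA_eq, portB_eq]
  show finA (output.foldl stepA ([], PySem.Dict.empty)) =
    ((output.foldl stepBlk ([], [])).1 ++ [(output.foldl stepBlk ([], [])).2]).foldl
      (fun results block =>
        if (buildB block).items = [] then results else results ++ [(buildB block).items]) []
  rw [fold_A, fold_emit, fold_blocks]
  simp only [List.nil_append]
  rw [main_bridge]
  rfl
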